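-- pv_equiv track=rewrite | github.com/Pherakki/pyValkLib | containers/CCRS/CCRSReadWriter.py | decompressCCRS
-- ===== SOURCE A (Python) =====
-- def pull_bytecode(ENRS_iter, byte_power, bytecode_value):
--     for _ in range((1 << byte_power) - 1):
--         elem = next(ENRS_iter)
--         bytecode_value <<= 8
--         bytecode_value |= elem
--
--     return bytecode_value
--
-- def decompressInt(ENRS_iter):
--     elem = next(ENRS_iter)
--     byte_power = elem >> 6
--     bytecode_value = elem & 0x3F
--
--     return pull_bytecode(ENRS_iter, byte_power, bytecode_value)
--
-- def decompressCCRS(num_groups, data):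
--     offset = 0
--     offsets = []
--
--     CCRS_iter_data = iter(data)
--     for loop in range(num_groups):
--         # Decode the CCRS spec
--         jump_from_previous_stencil_group = decompressInt(CCRS_iter_data)
--         offset += jump_from_previous_stencil_group
--
--         num_sub_stencils = decompressInt(CCRS_iter_data)
--         stencil_size = decompressInt(CCRS_iter_data)
--         stencil_repetitions = decompressInt(CCRS_iter_data)
--         working_offset = offset
--         sub_stencil_defs = []
--         for j in range(num_sub_stencils):
--             sub_stencil_defs.append([decompressInt(CCRS_iter_data),
--                                      decompressInt(CCRS_iter_data),
--                                      decompressInt(CCRS_iter_data)])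
--         # Generate Offsets
--         working_offset = offset
--         stencil_group = []
--         for i in range(stencil_repetitions):
--             saved_offset = working_offset + stencil_size
--             stencil = []
--             for j in range(num_sub_stencils):
--                 array_loop_skip, array_count, bytecode = sub_stencil_defs[j]
--                 working_offset += array_loop_skip
--
--
--                 sub_stencil = []
--                 if bytecode == 0:
--                     for k in range(array_count):
--                         sub_stencil.append((working_offset, 0))
--                         working_offset += 0x10
--                 elif bytecode == 1:
--                     for k in range(array_count):
--                         sub_stencil.append((working_offset, 1))
--                         working_offset += 4
--                 elif bytecode == 2:
--                     for k in range(array_count):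
--                         sub_stencil.append((working_offset, 2))
--                         working_offset += 2
--                 elif bytecode == 3:
--                     for k in range(array_count):
--                         sub_stencil.append((working_offset, 3))
--                         working_offset += 2
--                 elif bytecode == 4:
--                     for k in range(array_count):
--                         sub_stencil.append((working_offset, 4))
--                         working_offset += 2
--                 elif bytecode == 5:
--                     for k in range(array_count):
--                         sub_stencil.append((working_offset, 5))
--                         working_offset += 2
--                 elif bytecode > 5:
--                     assert 0, f"Bytecode > 5, {array_count}"
--
--                 stencil.append(sub_stencil)
--
--             working_offset = saved_offset
--             stencil_group.append(stencil)
--         offsets.append(stencil_group)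
--
--     return offsets
-- ===== SOURCE B (Python) =====
-- def pull_bytecode(ENRS_iter, byte_power, bytecode_value):
--     for _ in range((1 << byte_power) - 1):
--         elem = next(ENRS_iter)
--         bytecode_value <<= 8
--         bytecode_value |= elem
--     return bytecode_value
--
-- def decompressInt(ENRS_iter):
--     elem = next(ENRS_iter)
--     return pull_bytecode(ENRS_iter, elem >> 6, elem & 0x3F)
--
-- STEPS = {0: 0x10, 1: 4, 2: 2, 3: 2, 4: 2, 5: 2}
--
-- def decompressCCRS(num_groups, data):
--     offset = 0
--     offsets = []
--     it = iter(data)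
--     for _ in range(num_groups):
--         offset += decompressInt(it)
--         num_sub_stencils = decompressInt(it)
--         stencil_size = decompressInt(it)
--         stencil_repetitions = decompressInt(it)
--         defs = [(decompressInt(it), decompressInt(it), decompressInt(it))
--                 for _ in range(num_sub_stencils)]
--         if stencil_repetitions > 0:
--             # Build one stencil template relative to the group base offset,
--             # then emit each repetition by shifting it by i*stencil_size.
--             w = 0
--             template = []
--             for skip, count, bytecode in defs:
--                 w += skip
--                 if 0 <= bytecode <= 5:
--                     step = STEPS[bytecode]
--                     row = [(w + k * step, bytecode) for k in range(count)]
--                     template.append(row)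
--                     w += len(row) * step
--                 elif bytecode > 5:
--                     assert 0, f"Bytecode > 5, {count}"
--                 else:
--                     template.append([])
--             group = [[[(o + offset + i * stencil_size, t) for (o, t) in row]
--                       for row in template]
--                      for i in range(stencil_repetitions)]
--         else:
--             group = []
--         offsets.append(group)
--     return offsets
-- ===== Notes on version B (the rewrite author's own statement) =====
-- stated objective: alternative
-- what changed: Instead of re-running the bytecode branch logic for every repetition with a mutating working offset, B builds each group's stencil once as a template of relative offsets (rows in closed form w + k*step) and emits every repetition by shifting the template by i*stencil_size.
import Mathlib
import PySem

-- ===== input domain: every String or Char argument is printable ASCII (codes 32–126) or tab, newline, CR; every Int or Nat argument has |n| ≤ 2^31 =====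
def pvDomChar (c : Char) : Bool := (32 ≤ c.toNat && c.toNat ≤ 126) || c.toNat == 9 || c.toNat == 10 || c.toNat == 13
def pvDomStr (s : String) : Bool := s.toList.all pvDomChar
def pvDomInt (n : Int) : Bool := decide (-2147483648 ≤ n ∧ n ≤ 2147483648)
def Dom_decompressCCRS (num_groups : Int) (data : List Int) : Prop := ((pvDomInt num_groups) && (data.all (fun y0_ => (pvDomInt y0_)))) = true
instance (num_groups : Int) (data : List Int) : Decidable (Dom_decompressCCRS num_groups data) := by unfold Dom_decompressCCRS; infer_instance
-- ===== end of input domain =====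

-- B builds each group's stencil once as a template of relative offsets and emits every
-- repetition by an arithmetic shift (i*stencil_size), instead of A's per-repetition regeneration.


-- ===== PORT A =====
-- The Python iterator is modelled by threading the remaining list.  Where Python raises
-- (StopIteration on an exhausted iterator, ValueError on a negative shift count, the
-- assert for bytecode > 5) the port returns a default; Pre_ excludes exactly those inputs.
-- `acc <<= 8; acc |= elem` is `Int.lor (acc*256) elem` (Python's << on any int is *256,
-- and Int.lor is Python's infinite-two's-complement `|`).
def pullBytecode : List Int → Nat → Int → Int × List Int
  | l, 0, acc => (acc, l)
  | [], _+1, acc => (acc, [])                        -- StopIteration: outside Pre_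
  | e :: r, n+1, acc => pullBytecode r n (Int.lor (acc * 256) e)

-- decompressInt: head byte e, byte_power = e >> 6, value = e & 0x3F.  For e ≥ 0 (the only
-- heads Pre_ admits) e >> 6 = (e/64).toNat and e & 0x3F = e % 64; e < 0 raises in Python.
def decompressIntP : List Int → Int × List Int
  | [] => (0, [])                                    -- StopIteration: outside Pre_
  | e :: r => pullBytecode r (2 ^ (e / 64).toNat - 1) (e % 64)

-- the `for j in range(num_sub_stencils)` loop reading [a, b, c] triples
def readDefsP : Nat → List Int → List (Int × Int × Int) × List Int
  | 0, l => ([], l)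
  | n+1, l =>
    let (a, l) := decompressIntP l
    let (b, l) := decompressIntP l
    let (c, l) := decompressIntP l
    let (ds, l') := readDefsP n l
    ((a, b, c) :: ds, l')

-- `for k in range(array_count): append((working_offset, t)); working_offset += step`
def arrA : Nat → Int → Int → Int → List (Int × Int) × Int
  | 0, w, _, _ => ([], w)
  | k+1, w, t, step =>
    let (rest, w') := arrA k (w + step) t step
    ((w, t) :: rest, w')

-- the `for j in range(num_sub_stencils)` generation loop (the six elif branches)
def subLoopA : List (Int × Int × Int) → Int → List (List (Int × Int)) × Int
  | [], w => ([], w)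
  | (skip, cnt, bc) :: rest, w =>
    let w := w + skip
    let (sub, w) :=
      if bc = 0 then arrA cnt.toNat w 0 16
      else if bc = 1 then arrA cnt.toNat w 1 4
      else if bc = 2 then arrA cnt.toNat w 2 2
      else if bc = 3 then arrA cnt.toNat w 3 2
      else if bc = 4 then arrA cnt.toNat w 4 2
      else if bc = 5 then arrA cnt.toNat w 5 2
      else ([], w)       -- bc > 5: Python asserts (outside Pre_); bc < 0: no branch fires
    let (subs, w') := subLoopA rest w
    (sub :: subs, w')

-- `for i in range(stencil_repetitions)`: each repetition starts at saved = w + stencil_size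
def repLoopA : Nat → Int → Int → List (Int × Int × Int) → List (List (List (Int × Int)))
  | 0, _, _, _ => []
  | i+1, w, size, defs =>
    let saved := w + size
    let (stencil, _) := subLoopA defs w
    stencil :: repLoopA i saved size defs

-- `for loop in range(num_groups)`
def groupLoopA : Nat → Int → List Int → List (List (List (List (Int × Int))))
  | 0, _, _ => []
  | g+1, offset, l =>
    let (jump, l) := decompressIntP l
    let offset := offset + jump
    let (nsubs, l) := decompressIntP l
    let (size, l) := decompressIntP l
    let (reps, l) := decompressIntP l
    let (defs, l) := readDefsP nsubs.toNat l
    let group := repLoopA reps.toNat offset size defs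
    group :: groupLoopA g offset l

def decompressCCRS (num_groups : Int) (data : List Int) : List (List (List (List (Int × Int)))) :=
  groupLoopA num_groups.toNat 0 data

-- ===== PORT B =====
-- B shares A's varint parsing (Source B carries the identical pull_bytecode/decompressInt and
-- reads the triples in the same order); only the offset generation differs: one relative
-- template per group, each row a closed-form `w + k*step`, then per-repetition shifts.
def templateB : List (Int × Int × Int) → Int → List (List (Int × Int)) × Int
  | [], w => ([], w)
  | (skip, cnt, bc) :: rest, w =>
    let w := w + skip
    if 0 ≤ bc ∧ bc ≤ 5 then
      let step : Int := if bc = 0 then 16 else if bc = 1 then 4 else 2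
      let row := (List.range cnt.toNat).map (fun (k : Nat) => (w + (k : Int) * step, bc))
      let (t, w') := templateB rest (w + (row.length : Int) * step)
      (row :: t, w')
    else               -- bc > 5 asserts in Source B (outside Pre_); bc < 0 appends []
      let (t, w') := templateB rest w
      ([] :: t, w')

def groupLoopB : Nat → Int → List Int → List (List (List (List (Int × Int))))
  | 0, _, _ => []
  | g+1, offset, l =>
    let (jump, l) := decompressIntP l
    let offset := offset + jump
    let (nsubs, l) := decompressIntP l
    let (size, l) := decompressIntP l
    let (reps, l) := decompressIntP l
    let (defs, l) := readDefsP nsubs.toNat l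
    let group :=
      if 0 < reps then
        let (tmpl, _) := templateB defs 0
        (List.range reps.toNat).map (fun (i : Nat) =>
          tmpl.map (List.map (fun p : Int × Int => (p.1 + offset + (i : Int) * size, p.2))))
      else []
    group :: groupLoopB g offset l

def decompressCCRS_alt (num_groups : Int) (data : List Int) : List (List (List (List (Int × Int)))) :=
  groupLoopB num_groups.toNat 0 data

-- ===== PRECONDITION & SPEC =====
-- Pre_: data is a well-formed CCRS stream for num_groups groups — every varint head byte is
-- nonnegative, the stream holds all required varints, and no group with repetitions > 0
-- declares a sub-stencil bytecode > 5.  These are exactly the inputs where the Python A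
-- returns normally (elsewhere it raises ValueError / StopIteration / AssertionError).
-- a varint: a nonnegative head byte e followed by (1 << (e >> 6)) - 1 continuation bytes,
-- whose value is the base-256 accumulation of those bytes onto e & 0x3F
def pvReadInt? : List Int → Option (Int × List Int)
  | [] => none
  | e :: r =>
    if e < 0 then none
    else
      let n := 2 ^ (e / 64).toNat - 1
      if r.length < n then none
      else some ((r.take n).foldl (fun acc b => Int.lor (acc * 256) b) (e % 64), r.drop n)

def pvReadBCs? : Nat → List Int → Option (List Int × List Int)
  | 0, l => some ([], l)
  | n+1, l =>
    (pvReadInt? l).bind fun (_, l) =>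
    (pvReadInt? l).bind fun (_, l) =>
    (pvReadInt? l).bind fun (bc, l) =>
    (pvReadBCs? n l).map fun (bcs, l') => (bc :: bcs, l')

def pvValidGroups : Nat → List Int → Bool
  | 0, _ => true
  | n+1, l =>
    match pvReadInt? l with
    | none => false
    | some (_, l) =>
      match pvReadInt? l with
      | none => false
      | some (nsubs, l) =>
        match pvReadInt? l with
        | none => false
        | some (_, l) =>
          match pvReadInt? l with
          | none => false
          | some (reps, l) =>
            match pvReadBCs? nsubs.toNat l with
            | none => false
            | some (bcs, l) => (decide (reps ≤ 0) || bcs.all (· ≤ 5)) && pvValidGroups n l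

def Pre_decompressCCRS (num_groups : Int) (data : List Int) : Prop :=
  pvValidGroups num_groups.toNat data = true

instance (num_groups : Int) (data : List Int) : Decidable (Pre_decompressCCRS num_groups data) := by
  unfold Pre_decompressCCRS; infer_instance

def pvWitness_decompressCCRS : Int × List Int := (1, [0, 2, 4, 3, 1, 2, 1, 0, 3, 0])

def Spec_decompressCCRS (num_groups : Int) (data : List Int) (out : List (List (List (List (Int × Int))))) : Prop := out = decompressCCRS_alt num_groups data
instance (num_groups : Int) (data : List Int) (out : List (List (List (List (Int × Int))))) : Decidable (Spec_decompressCCRS num_groups data out) := by unfold Spec_decompressCCRS; infer_instance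

-- ===== CLAIM (what is proved, stated in full; the proofs are below) =====
def Claim_equal_decompressCCRS : Prop := ∀ (num_groups : Int) (data : List Int), Dom_decompressCCRS num_groups data → Pre_decompressCCRS num_groups data → Spec_decompressCCRS num_groups data (decompressCCRS num_groups data)

-- ===== LEMMAS AND PROOFS =====
-- A's per-element array loop equals the closed-form row plus the final offset.
lemma arrA_eq : ∀ (n : Nat) (w t step : Int),
    arrA n w t step = ((List.range n).map (fun (k : Nat) => (w + (k : Int) * step, t)), w + (n : Int) * step) := by
  intro n
  induction n with
  | zero => intro w t step; simp [arrA]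
  | succ n ih =>
    intro w t step
    have hlist : (List.range (n+1)).map (fun (k : Nat) => (w + (k : Int) * step, t))
        = (w, t) :: (List.range n).map (fun (k : Nat) => ((w + step) + (k : Int) * step, t)) := by
      rw [List.range_succ_eq_map, List.map_cons, List.map_map]
      congr 1
      · simp
      · refine List.map_congr_left fun k _ => ?_
        simp only [Function.comp_apply, Prod.mk.injEq]
        exact ⟨by push_cast; ring, trivial⟩
    simp only [arrA, ih]
    rw [hlist]
    refine Prod.ext rfl ?_
    show (w + step) + (n : Int) * step = w + ((n : Nat) + 1 : Int) * step
    ring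

-- the array loop at base u + d is the relative closed-form row shifted by d
lemma rowShift (u d t step : Int) (n : Nat) :
    (arrA n (u + d) t step).1
        = ((List.range n).map (fun (k : Nat) => (u + (k : Int) * step, t))).map
            (fun p : Int × Int => (p.1 + d, p.2))
      ∧ (arrA n (u + d) t step).2 = (u + (n : Int) * step) + d := by
  rw [arrA_eq]
  refine ⟨?_, by simp; ring⟩
  simp only [List.map_map]
  refine List.map_congr_left fun k _ => ?_
  simp only [Function.comp_apply, Prod.mk.injEq]
  exact ⟨by ring, trivial⟩

-- A's generation loop at base w + d is B's template at base w, shifted by d.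
lemma subLoopA_shift (defs : List (Int × Int × Int)) : ∀ (w d : Int),
    subLoopA defs (w + d) =
      ((templateB defs w).1.map (List.map (fun p : Int × Int => (p.1 + d, p.2))),
       (templateB defs w).2 + d) := by
  induction defs with
  | nil => intro w d; simp [subLoopA, templateB]
  | cons hd rest ih =>
    intro w d
    obtain ⟨skip, cnt, bc⟩ := hd
    simp only [subLoopA, templateB]
    have hbase : w + d + skip = (w + skip) + d := by ring
    rw [hbase]
    by_cases h05 : 0 ≤ bc ∧ bc ≤ 5
    · have hb : bc = 0 ∨ bc = 1 ∨ bc = 2 ∨ bc = 3 ∨ bc = 4 ∨ bc = 5 := by omega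
      rcases hb with h | h | h | h | h | h <;>
        subst h <;>
        simp only [if_pos h05, Int.reduceEq, reduceIte,
          (rowShift (w + skip) d _ _ cnt.toNat).1, (rowShift (w + skip) d _ _ cnt.toNat).2,
          List.length_map, List.length_range, List.map_cons, ih]
    · have hbc : ¬ bc = 0 ∧ ¬ bc = 1 ∧ ¬ bc = 2 ∧ ¬ bc = 3 ∧ ¬ bc = 4 ∧ ¬ bc = 5 := by omega
      obtain ⟨h0, h1, h2, h3, h4, h5⟩ := hbc
      simp only [if_neg h0, if_neg h1, if_neg h2, if_neg h3, if_neg h4, if_neg h5, if_neg h05, ih,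
        List.map_cons, List.map_nil]

-- A's repetition loop is B's range-map of shifted templates.
lemma repLoopA_eq (defs : List (Int × Int × Int)) (size : Int) : ∀ (n : Nat) (offset : Int),
    repLoopA n offset size defs =
      (List.range n).map (fun (i : Nat) =>
        (templateB defs 0).1.map
          (List.map (fun p : Int × Int => (p.1 + offset + (i : Int) * size, p.2)))) := by
  intro n
  induction n with
  | zero => intro offset; simp [repLoopA]
  | succ n ih =>
    intro offset
    have hsub : (subLoopA defs offset).1 =
        (templateB defs 0).1.map
          (List.map (fun p : Int × Int => (p.1 + offset + ((0 : Nat) : Int) * size, p.2))) := by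
      have h := subLoopA_shift defs 0 offset
      rw [zero_add] at h
      rw [h]
      refine List.map_congr_left fun sub _ => ?_
      refine List.map_congr_left fun p _ => ?_
      simp only [Prod.mk.injEq]
      exact ⟨by push_cast; ring, trivial⟩
    have hlist : (List.range (n+1)).map (fun (i : Nat) =>
          (templateB defs 0).1.map
            (List.map (fun p : Int × Int => (p.1 + offset + (i : Int) * size, p.2))))
        = (templateB defs 0).1.map
            (List.map (fun p : Int × Int => (p.1 + offset + ((0 : Nat) : Int) * size, p.2)))
          :: (List.range n).map (fun (i : Nat) =>
            (templateB defs 0).1.map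
              (List.map (fun p : Int × Int => (p.1 + (offset + size) + (i : Int) * size, p.2)))) := by
      rw [List.range_succ_eq_map, List.map_cons, List.map_map]
      congr 1
      refine List.map_congr_left fun i _ => ?_
      simp only [Function.comp_apply]
      have hfun : (fun p : Int × Int => (p.1 + offset + ((Nat.succ i : Nat) : Int) * size, p.2))
          = (fun p : Int × Int => (p.1 + (offset + size) + (i : Int) * size, p.2)) := by
        funext p
        simp only [Prod.mk.injEq]
        exact ⟨by push_cast; ring, trivial⟩
      rw [hfun]
    simp only [repLoopA, ih (offset + size)]
    rw [hlist, hsub]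

-- the two group loops agree everywhere (parsing is shared; generation by the lemmas above)
lemma groupLoop_eq : ∀ (g : Nat) (offset : Int) (l : List Int),
    groupLoopA g offset l = groupLoopB g offset l := by
  intro g
  induction g with
  | zero => intro offset l; rfl
  | succ g ih =>
    intro offset l
    simp only [groupLoopA, groupLoopB, ih]
    congr 1
    set reps := (decompressIntP (decompressIntP (decompressIntP (decompressIntP l).2).2).2).1 with hreps
    by_cases h : 0 < reps
    · rw [if_pos h, repLoopA_eq]
    · rw [if_neg h]
      have : reps.toNat = 0 := by omega
      rw [this]
      rfl

-- ===== VERDICT (by name: the statement is the Claim_ definition above) =====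
theorem decompressCCRS_spec : Claim_equal_decompressCCRS := by
  intro num_groups data _ _
  unfold Spec_decompressCCRS decompressCCRS decompressCCRS_alt
  exact groupLoop_eq num_groups.toNat 0 data
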